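-- pv_equiv track=rewrite | github.com/MrBrantCode/unitest_baseline | mut_generate/mist_train_cf/cf_56507/solution.py | largest_smallest_summed_integers
-- ===== SOURCE A (Python) =====
-- def largest_smallest_summed_integers(lst):
--     # filtering the list into even and odd numbers
--     evens = [x for x in lst if x % 2 == 0]
--     odds = [x for x in lst if x % 2 != 0]
--     # finding the maximum of negative numbers and minimum of positive numbers
--     a = max([x for x in evens if x < 0], default=None)
--     b = min([x for x in evens if x > 0], default=None)
--     c = max([x for x in odds if x < 0], default=None)
--     d = min([x for x in odds if x > 0], default=None)
--     # calculating the sum 'e' and 'f'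
--     e = (a if a else 0) + (b if b else 0) + (c if c else 0) + (d if d else 0)
--     f = e + (e if e else 0)
--     return a, b, c, d, e, f
-- ===== SOURCE B (Python) =====
-- def largest_smallest_summed_integers(lst):
--     # single pass maintaining the four running extrema instead of six list scans
--     a = b = c = d = None
--     for x in lst:
--         if x % 2 == 0:
--             if x < 0:
--                 a = x if a is None else max(a, x)
--             elif x > 0:
--                 b = x if b is None else min(b, x)
--         else:
--             if x < 0:
--                 c = x if c is None else max(c, x)
--             else:  # an odd number is never 0, so here x > 0
--                 d = x if d is None else min(d, x)
--     e = (a or 0) + (b or 0) + (c or 0) + (d or 0)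
--     return a, b, c, d, e, e + (e or 0)
-- ===== Notes on version B (the rewrite author's own statement) =====
-- stated objective: simpler
-- what changed: Replaces the two filter passes plus four extremum scans (six traversals and six intermediate lists) with a single loop over lst maintaining four running extrema, then the same sums.
import Mathlib
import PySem

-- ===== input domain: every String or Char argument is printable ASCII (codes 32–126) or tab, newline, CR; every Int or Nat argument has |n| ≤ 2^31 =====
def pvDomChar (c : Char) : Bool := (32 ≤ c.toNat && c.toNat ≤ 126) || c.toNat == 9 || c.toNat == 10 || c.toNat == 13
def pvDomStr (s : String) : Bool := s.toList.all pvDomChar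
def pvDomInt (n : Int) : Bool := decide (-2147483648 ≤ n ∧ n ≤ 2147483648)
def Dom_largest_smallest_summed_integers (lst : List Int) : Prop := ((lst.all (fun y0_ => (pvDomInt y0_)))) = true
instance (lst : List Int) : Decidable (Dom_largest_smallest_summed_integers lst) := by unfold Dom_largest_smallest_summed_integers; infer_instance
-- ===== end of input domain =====

-- B replaces A's six list traversals by one loop keeping four running extrema (objective: simpler).

-- ===== PORT A =====
-- Python truthiness `v if v else 0` on an Optional[int] (used identically by A and B)
def pyOrZero (o : Option Int) : Int :=
  match o with
  | none => 0
  | some v => if v == 0 then 0 else v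

def largest_smallest_summed_integers (lst : List Int) : Option Int × Option Int × Option Int × Option Int × Int × Int :=
  let evens := lst.filter (fun x => PySem.Int.mod x 2 == 0)
  let odds := lst.filter (fun x => !(PySem.Int.mod x 2 == 0))
  let a := PySem.List.max? (evens.filter (fun x => decide (x < 0))) (fun y => y)
  let b := PySem.List.min? (evens.filter (fun x => decide (0 < x))) (fun y => y)
  let c := PySem.List.max? (odds.filter (fun x => decide (x < 0))) (fun y => y)
  let d := PySem.List.min? (odds.filter (fun x => decide (0 < x))) (fun y => y)
  let e := pyOrZero a + pyOrZero b + pyOrZero c + pyOrZero d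
  let f := e + (if e == 0 then 0 else e)
  (a, b, c, d, e, f)

-- ===== PORT B =====
-- one loop step of Source B: update the bucket x belongs to
def lsAltStep (acc : Option Int × Option Int × Option Int × Option Int) (x : Int) :
    Option Int × Option Int × Option Int × Option Int :=
  let (a, b, c, d) := acc
  if PySem.Int.mod x 2 == 0 then
    if x < 0 then (some (match a with | none => x | some v => max v x), b, c, d)
    else if 0 < x then (a, some (match b with | none => x | some v => min v x), c, d)
    else (a, b, c, d)
  else
    if x < 0 then (a, b, some (match c with | none => x | some v => max v x), d)
    else (a, b, c, some (match d with | none => x | some v => min v x))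

def largest_smallest_summed_integers_alt (lst : List Int) : Option Int × Option Int × Option Int × Option Int × Int × Int :=
  let (a, b, c, d) := lst.foldl lsAltStep (none, none, none, none)
  let e := pyOrZero a + pyOrZero b + pyOrZero c + pyOrZero d
  (a, b, c, d, e, e + (if e == 0 then 0 else e))

-- ===== PRECONDITION & SPEC =====
def Spec_largest_smallest_summed_integers (lst : List Int) (out : Option Int × Option Int × Option Int × Option Int × Int × Int) : Prop := out = largest_smallest_summed_integers_alt lst
instance (lst : List Int) (out : Option Int × Option Int × Option Int × Option Int × Int × Int) : Decidable (Spec_largest_smallest_summed_integers lst out) := by unfold Spec_largest_smallest_summed_integers; infer_instance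

-- ===== CLAIM (what is proved, stated in full; the proofs are below) =====
def Claim_equal_largest_smallest_summed_integers : Prop := ∀ (lst : List Int), Dom_largest_smallest_summed_integers lst → Spec_largest_smallest_summed_integers lst (largest_smallest_summed_integers lst)

-- ===== LEMMAS AND PROOFS =====

-- running max/min seeded by an optional accumulator, as computed by the loop
def omax (o : Option Int) (l : List Int) : Option Int :=
  match o with
  | none => PySem.List.max? l (fun y => y)
  | some a => some (l.foldl max a)

def omin (o : Option Int) (l : List Int) : Option Int :=
  match o with
  | none => PySem.List.min? l (fun y => y)
  | some a => some (l.foldl min a)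

theorem loop_char (lst : List Int) (a b c d : Option Int) :
    lst.foldl lsAltStep (a, b, c, d) =
      (omax a (lst.filter (fun x => PySem.Int.mod x 2 == 0 && decide (x < 0))),
       omin b (lst.filter (fun x => PySem.Int.mod x 2 == 0 && decide (0 < x))),
       omax c (lst.filter (fun x => !(PySem.Int.mod x 2 == 0) && decide (x < 0))),
       omin d (lst.filter (fun x => !(PySem.Int.mod x 2 == 0) && decide (0 < x)))) := by
  induction lst generalizing a b c d with
  | nil => cases a <;> cases b <;> cases c <;> cases d <;> simp [omax, omin, PySem.List.max?, PySem.List.min?]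
  | cons x xs ih =>
    simp only [List.foldl_cons, List.filter_cons]
    by_cases hd : (2 : Int) ∣ x
    · by_cases hneg : x < 0
      · simp [lsAltStep, hd, hneg, not_lt.mpr (le_of_lt hneg), ih]
        cases a <;> simp [omax, PySem.List.max?_id_cons]
      · by_cases hpos : 0 < x
        · simp [lsAltStep, hd, hneg, hpos, ih]
          cases b <;> simp [omin, PySem.List.min?_id_cons]
        · simp [lsAltStep, hd, hneg, hpos, ih]
    · have hx0 : x ≠ 0 := by rintro rfl; exact hd ⟨0, rfl⟩
      by_cases hneg : x < 0
      · simp [lsAltStep, hd, hneg, not_lt.mpr (le_of_lt hneg), ih]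
        cases c <;> simp [omax, PySem.List.max?_id_cons]
      · have hpos : 0 < x := by omega
        simp [lsAltStep, hd, hneg, hpos, ih]
        cases d <;> simp [omin, PySem.List.min?_id_cons]

-- ===== VERDICT (by name: the statement is the Claim_ definition above) =====
theorem largest_smallest_summed_integers_spec : Claim_equal_largest_smallest_summed_integers := by
  intro lst _
  unfold Spec_largest_smallest_summed_integers largest_smallest_summed_integers largest_smallest_summed_integers_alt
  rw [loop_char]
  simp [omax, omin, List.filter_filter, Bool.and_comm]
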